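-- pv_equiv track=rewrite | github.com/pypi-data/pypi-mirror-72 | packages/depcrank/depcrank-0.1.0.tar.gz/depcrank-0.1.0/depcrank/display.py | find_single_rank
-- ===== SOURCE A (Python) =====
-- import operator
--
-- def _sort_data(input_data):
--     return sorted(input_data.items(), key=operator.itemgetter(1),
--         reverse=True)
--
-- def find_single_rank(input_data, package, exclude=None):
--     # FIXME: give equal weight to same score
--     if exclude:
--         for package in exclude:
--             if package in input_data:
--                 input_data.pop(package)
--
--     sorted_data = _sort_data(input_data)
--
--     for i in range(len(sorted_data)):
--         if sorted_data[i][0] == package: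
--             return (i + 1, sorted_data[i][1])
--
--     return None
-- ===== SOURCE B (Python) =====
-- def find_single_rank(input_data, package, exclude=None):
--     # One counting pass: rank = 1 + #(higher scores) + #(equal scores appearing earlier),
--     # which is the index the stable descending sort would give -- no sorting needed.
--     # (Does not mutate input_data; the original pops excluded keys in place.)
--     excluded = set(exclude) if exclude else set()
--     if package in excluded:
--         return None
--     score = input_data.get(package)
--     if score is None:
--         return None
--     rank = 1
--     before = True
--     for name, s in input_data.items():
--         if name == package:
--             before = False
--         elif name not in excluded and (s > score or (s == score and before)):
--             rank += 1
--     return (rank, score)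
-- ===== Notes on version B (the rewrite author's own statement) =====
-- stated objective: alternative
-- what changed: B replaces A's sort-then-linear-scan (sorted(items, reverse=True) followed by an index search) by a single counting pass that computes the stable descending rank directly (1 + entries with higher score + earlier entries with equal score) after one dict lookup of the package; B also fixes A's loop-variable shadowing bug and does not mutate input_data.
-- intended difference: On inputs with a nonempty exclude list where the requested package is present and not excluded, A always returns None (its loop 'for package in exclude' rebinds 'package' to the last excluded name, which it just removed), while B returns the intended rank and score of the requested package among the remaining entries. — e.g. on find_single_rank([("a", 3), ("b", 5)], "a", some ["b"]): A returns none, B returns some (1, 3)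
import Mathlib
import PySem

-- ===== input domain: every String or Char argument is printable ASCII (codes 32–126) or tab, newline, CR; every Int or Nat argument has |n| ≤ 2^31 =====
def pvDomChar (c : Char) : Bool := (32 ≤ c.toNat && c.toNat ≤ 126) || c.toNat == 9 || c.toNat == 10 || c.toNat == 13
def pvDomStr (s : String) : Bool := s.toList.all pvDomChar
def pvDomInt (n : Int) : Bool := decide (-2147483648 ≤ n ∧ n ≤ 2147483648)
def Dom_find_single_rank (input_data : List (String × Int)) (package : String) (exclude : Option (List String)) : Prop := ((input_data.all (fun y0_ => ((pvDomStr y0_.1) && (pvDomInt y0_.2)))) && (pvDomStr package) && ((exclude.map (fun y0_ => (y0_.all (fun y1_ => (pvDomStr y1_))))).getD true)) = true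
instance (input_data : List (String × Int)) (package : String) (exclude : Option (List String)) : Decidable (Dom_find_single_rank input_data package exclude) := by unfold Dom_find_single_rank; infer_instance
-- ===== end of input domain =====

-- B computes the rank by one counting pass instead of A's sort-then-scan; return-value
-- equivalence only: A pops excluded keys from input_data in place, B does not mutate it.

-- ===== PORT A =====
-- the exclusion-loop body: 'if package in input_data: input_data.pop(package)' (the loop
-- variable 'package' is rebound to each excluded name, as in A)
def pvStepE (st : PySem.Dict String Int × String) (p : String) : PySem.Dict String Int × String :=
  (if st.1.contains p then st.1.erase p else st.1, p)

-- _sort_data: sorted(input_data.items(), key=itemgetter(1), reverse=True)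
def pvSortData (d : PySem.Dict String Int) : List (String × Int) :=
  PySem.List.sorted d.items (fun p => p.2) true

-- 'for i in range(len(sorted_data)): if sorted_data[i][0] == package: return (i+1, sorted_data[i][1])'
def pvScanA : List (String × Int) → String → Int → Option (Int × Int)
  | [], _, _ => none
  | (k, v) :: rest, pkg, i => if k = pkg then some (i + 1, v) else pvScanA rest pkg (i + 1)

def find_single_rank (input_data : List (String × Int)) (package : String) (exclude : Option (List String)) : Option (Int × Int) :=
  let st : PySem.Dict String Int × String :=
    match exclude with
    | some l => if l ≠ [] then l.foldl pvStepE (PySem.Dict.mk input_data, package)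
                else (PySem.Dict.mk input_data, package)
    | none => (PySem.Dict.mk input_data, package)
  pvScanA (pvSortData st.1) st.2 0

-- ===== PORT B =====
-- one-pass loop body: count entries ranked above 'package' by the stable descending order
def pvStepB (excluded : PySem.Set String) (package : String) (score : Int)
    (st : Int × Bool) (p : String × Int) : Int × Bool :=
  if p.1 = package then (st.1, false)
  else if PySem.Set.contains excluded p.1 = false ∧ (score < p.2 ∨ (p.2 = score ∧ st.2 = true)) then
    (st.1 + 1, st.2)
  else st

def find_single_rank_alt (input_data : List (String × Int)) (package : String) (exclude : Option (List String)) : Option (Int × Int) :=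
  let excluded : PySem.Set String :=
    match exclude with
    | some l => if l ≠ [] then PySem.Set.ofList l else PySem.Set.empty
    | none => PySem.Set.empty
  if PySem.Set.contains excluded package then none
  else
    match (PySem.Dict.mk input_data).get? package with
    | none => none
    | some score =>
        let st := input_data.foldl (pvStepB excluded package score) (1, true)
        some (st.1, score)

-- ===== PRECONDITION & SPEC =====
-- Pre_ excludes association lists with duplicate keys: they do not represent a Python dict
-- (dict construction collapses duplicates), so A's behaviour on them is not defined by A's code.
def Pre_find_single_rank (input_data : List (String × Int)) (package : String) (exclude : Option (List String)) : Prop :=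
  (input_data.map Prod.fst).Nodup
instance (input_data : List (String × Int)) (package : String) (exclude : Option (List String)) : Decidable (Pre_find_single_rank input_data package exclude) := by unfold Pre_find_single_rank; infer_instance
def pvWitness_find_single_rank : (List (String × Int)) × String × Option (List String) :=
  ([("a", 3), ("b", 5)], "a", none)

-- On inputs with a nonempty exclude list whose searched package is present and not excluded,
-- A always returns None (its loop 'for package in exclude' rebinds the variable 'package' to
-- the last excluded name, which was just removed), while B returns the intended rank of the
-- requested package among the remaining entries.
def D_find_single_rank (input_data : List (String × Int)) (package : String) (exclude : Option (List String)) : Prop :=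
  exclude.getD [] ≠ [] ∧ package ∈ input_data.map Prod.fst ∧ package ∉ exclude.getD []
instance (input_data : List (String × Int)) (package : String) (exclude : Option (List String)) : Decidable (D_find_single_rank input_data package exclude) := by unfold D_find_single_rank; infer_instance

def Spec_find_single_rank (input_data : List (String × Int)) (package : String) (exclude : Option (List String)) (out : Option (Int × Int)) : Prop := ¬ D_find_single_rank input_data package exclude → out = find_single_rank_alt input_data package exclude
instance (input_data : List (String × Int)) (package : String) (exclude : Option (List String)) (out : Option (Int × Int)) : Decidable (Spec_find_single_rank input_data package exclude out) := by unfold Spec_find_single_rank; infer_instance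

def pvDiffWitness_find_single_rank : (List (String × Int)) × String × Option (List String) :=
  ([("a", 3), ("b", 5)], "a", some ["b"])
def pvDiffWitnessOut_find_single_rank : (Option (Int × Int)) × (Option (Int × Int)) :=
  (none, some (1, 3))

-- ===== CLAIM (what is proved, stated in full; the proofs are below) =====
def Claim_unchanged_find_single_rank : Prop := ∀ (input_data : List (String × Int)) (package : String) (exclude : Option (List String)), Dom_find_single_rank input_data package exclude → Pre_find_single_rank input_data package exclude → Spec_find_single_rank input_data package exclude (find_single_rank input_data package exclude)
def Claim_changed_find_single_rank : Prop := Dom_find_single_rank (pvDiffWitness_find_single_rank.1) (pvDiffWitness_find_single_rank.2.1) (pvDiffWitness_find_single_rank.2.2) ∧ Pre_find_single_rank (pvDiffWitness_find_single_rank.1) (pvDiffWitness_find_single_rank.2.1) (pvDiffWitness_find_single_rank.2.2) ∧ D_find_single_rank (pvDiffWitness_find_single_rank.1) (pvDiffWitness_find_single_rank.2.1) (pvDiffWitness_find_single_rank.2.2) ∧ find_single_rank (pvDiffWitness_find_single_rank.1) (pvDiffWitness_find_single_rank.2.1) (pvDiffWitness_find_single_rank.2.2) = pvDiffWitnessOut_find_single_rank.1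 ∧ find_single_rank_alt (pvDiffWitness_find_single_rank.1) (pvDiffWitness_find_single_rank.2.1) (pvDiffWitness_find_single_rank.2.2) = pvDiffWitnessOut_find_single_rank.2 ∧ pvDiffWitnessOut_find_single_rank.1 ≠ pvDiffWitnessOut_find_single_rank.2
def Claim_exact_find_single_rank : Prop := ∀ (input_data : List (String × Int)) (package : String) (exclude : Option (List String)), Dom_find_single_rank input_data package exclude → Pre_find_single_rank input_data package exclude → D_find_single_rank input_data package exclude → find_single_rank input_data package exclude ≠ find_single_rank_alt input_data package exclude

-- ===== LEMMAS AND PROOFS =====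

lemma pv_scan_shift (pkg : String) : ∀ (ys : List (String × Int)) (i : Int),
    pvScanA ys pkg (i + 1) = (pvScanA ys pkg i).map (fun r => (r.1 + 1, r.2)) := by
  intro ys
  induction ys with
  | nil => intro i; simp [pvScanA]
  | cons y t ih =>
      intro i
      obtain ⟨k, v⟩ := y
      by_cases h : k = pkg
      · simp [pvScanA, h]
      · simp [pvScanA, h, ih (i + 1)]

lemma pv_scan_none (pkg : String) : ∀ (ys : List (String × Int)) (i : Int),
    pkg ∉ ys.map Prod.fst → pvScanA ys pkg i = none := by
  intro ys
  induction ys with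
  | nil => intro i _; simp [pvScanA]
  | cons y t ih =>
      intro i h
      obtain ⟨k, v⟩ := y
      simp at h
      have hk : ¬ k = pkg := fun hh => h.1 hh.symm
      simp [pvScanA, hk, ih (i + 1) (by simp [h.2])]

lemma pv_scan_mem (pkg : String) : ∀ (ys : List (String × Int)) (i r s : Int),
    pvScanA ys pkg i = some (r, s) → (pkg, s) ∈ ys := by
  intro ys
  induction ys with
  | nil => intro i r s h; simp [pvScanA] at h
  | cons y t ih =>
      intro i r s h
      obtain ⟨k, v⟩ := y
      by_cases hk : k = pkg
      · simp [pvScanA, hk] at h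
        simp [hk, h.2]
      · simp [pvScanA, hk] at h
        exact List.mem_cons_of_mem _ (ih _ _ _ h)

lemma pv_insert_scan (pkg : String) (x : String × Int) (hx : x.1 ≠ pkg) :
    ∀ (ys : List (String × Int)), List.Pairwise (fun a b => b.2 ≤ a.2) ys → ∀ (i : Int),
    pvScanA (PySem.List.insertBy (fun a b => decide (b.2 < a.2)) x ys) pkg i
      = (pvScanA ys pkg i).map (fun r => if r.2 < x.2 then (r.1 + 1, r.2) else r) := by
  intro ys
  induction ys with
  | nil =>
      intro _ i
      obtain ⟨xk, xv⟩ := x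
      simp at hx
      simp [PySem.List.insertBy, pvScanA, hx]
  | cons y t ih =>
      intro hp i
      obtain ⟨xk, xv⟩ := x
      simp at hx
      by_cases hb : y.2 < xv
      · rw [show PySem.List.insertBy (fun a b => decide (b.2 < a.2)) (xk, xv) (y :: t)
              = (xk, xv) :: y :: t by simp [PySem.List.insertBy, hb]]
        rw [show pvScanA ((xk, xv) :: y :: t) pkg i = pvScanA (y :: t) pkg (i + 1) by
              simp [pvScanA, hx]]
        rw [pv_scan_shift]
        cases hsc : pvScanA (y :: t) pkg i with
        | none => simp
        | some r =>
            obtain ⟨rr, s⟩ := r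
            have hmem := pv_scan_mem pkg _ _ _ _ hsc
            have hs : s < xv := by
              rcases List.mem_cons.mp hmem with h | h
              · rw [← h] at hb; exact hb
              · exact lt_of_le_of_lt (List.rel_of_pairwise_cons hp h) hb
            simp [hs]
      · rw [show PySem.List.insertBy (fun a b => decide (b.2 < a.2)) (xk, xv) (y :: t)
              = y :: PySem.List.insertBy (fun a b => decide (b.2 < a.2)) (xk, xv) t by
              simp [PySem.List.insertBy, hb]]
        obtain ⟨yk, yv⟩ := y
        by_cases hk : yk = pkg
        · simp [pvScanA, hk]
          simp at hb
          omega
        · simp only [pvScanA, if_neg hk]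
          exact ih hp.of_cons (i + 1)

lemma pv_insert_pkg (pkg : String) (s : Int) :
    ∀ (ys : List (String × Int)), List.Pairwise (fun a b => b.2 ≤ a.2) ys →
    pkg ∉ ys.map Prod.fst → ∀ (i : Int),
    pvScanA (PySem.List.insertBy (fun a b => decide (b.2 < a.2)) (pkg, s) ys) pkg i
      = some (i + (ys.countP (fun y => decide (s ≤ y.2)) : Int) + 1, s) := by
  intro ys
  induction ys with
  | nil => intro _ _ i; simp [PySem.List.insertBy, pvScanA]
  | cons y t ih =>
      intro hp hnm i
      simp at hnm
      by_cases hb : y.2 < s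
      · rw [show PySem.List.insertBy (fun a b => decide (b.2 < a.2)) (pkg, s) (y :: t)
              = (pkg, s) :: y :: t by simp [PySem.List.insertBy, hb]]
        have hcnt : (y :: t).countP (fun y => decide (s ≤ y.2)) = 0 := by
          rw [List.countP_eq_zero]
          intro a ha
          rcases List.mem_cons.mp ha with h | h
          · simp [h]; omega
          · have := List.rel_of_pairwise_cons hp h
            simp; omega
        simp [pvScanA, hcnt]
      · rw [show PySem.List.insertBy (fun a b => decide (b.2 < a.2)) (pkg, s) (y :: t)
              = y :: PySem.List.insertBy (fun a b => decide (b.2 < a.2)) (pkg, s) t by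
              simp [PySem.List.insertBy, hb]]
        obtain ⟨yk, yv⟩ := y
        have hk : ¬ yk = pkg := fun hh => hnm.1 hh.symm
        rw [show pvScanA ((yk, yv) :: PySem.List.insertBy (fun a b => decide (b.2 < a.2)) (pkg, s) t) pkg i
              = pvScanA (PySem.List.insertBy (fun a b => decide (b.2 < a.2)) (pkg, s) t) pkg (i + 1) by
              simp [pvScanA, hk]]
        rw [ih hp.of_cons (by simp [hnm.2]) (i + 1)]
        have : (((yk, yv) :: t).countP (fun y => decide (s ≤ y.2)) : Int)
             = (t.countP (fun y => decide (s ≤ y.2)) : Int) + 1 := by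
          rw [List.countP_cons]
          simp at hb ⊢
          omega
        rw [this]
        simp only [Option.some.injEq, Prod.mk.injEq]
        exact ⟨by ring, trivial⟩

lemma pv_sorted_append (a b : List (String × Int)) :
    PySem.List.sorted (a ++ b) (fun p => p.2) true
      = b.foldl (fun acc x => PySem.List.insertBy (fun u v => decide ((fun p : String × Int => p.2) v < (fun p : String × Int => p.2) u)) x acc)
          (PySem.List.sorted a (fun p => p.2) true) := by
  rw [PySem.List.sorted_rev_eq_foldl_insertBy, PySem.List.sorted_rev_eq_foldl_insertBy, List.foldl_append]

lemma pv_mem_map_fst_sorted (pkg : String) (ys : List (String × Int)) (rev : Bool) :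
    pkg ∈ (PySem.List.sorted ys (fun p => p.2) rev).map Prod.fst ↔ pkg ∈ ys.map Prod.fst := by
  simp [List.mem_map, PySem.List.mem_sorted]

lemma pv_fold_v (pkg : String) (s : Int) :
    ∀ (v : List (String × Int)) (pre : List (String × Int)) (r : Int),
    (∀ x ∈ v, x.1 ≠ pkg) →
    pvScanA (PySem.List.sorted pre (fun p => p.2) true) pkg 0 = some (r, s) →
    pvScanA (v.foldl (fun acc x => PySem.List.insertBy (fun u w => decide ((fun p : String × Int => p.2) w < (fun p : String × Int => p.2) u)) x acc)
        (PySem.List.sorted pre (fun p => p.2) true)) pkg 0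
      = some (r + (v.countP (fun y => decide (s < y.2)) : Int), s) := by
  intro v
  induction v with
  | nil => intro pre r _ hbase; simpa using hbase
  | cons x t ih =>
      intro pre r hne hbase
      have hstep : PySem.List.insertBy (fun u w => decide ((fun p : String × Int => p.2) w < (fun p : String × Int => p.2) u)) x (PySem.List.sorted pre (fun p => p.2) true)
          = PySem.List.sorted (pre ++ [x]) (fun p => p.2) true := by
        rw [pv_sorted_append pre [x]]
        simp
      have hins := pv_insert_scan pkg x (hne x (by simp)) (PySem.List.sorted pre (fun p => p.2) true)
        (PySem.List.sorted_pairwise_rev pre (fun p => p.2)) 0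
      rw [hbase] at hins
      simp only [List.foldl_cons]
      rw [hstep] at hins ⊢
      by_cases hc : s < x.2
      · rw [ih (pre ++ [x]) (r + 1) (fun y hy => hne y (by simp [hy]))
            (by rw [hins]; simp [hc])]
        have : ((x :: t).countP (fun y => decide (s < y.2)) : Int)
             = (t.countP (fun y => decide (s < y.2)) : Int) + 1 := by
          rw [List.countP_cons]; simp [hc]
        rw [this]
        simp only [Option.some.injEq, Prod.mk.injEq]
        exact ⟨by ring, trivial⟩
      · rw [ih (pre ++ [x]) r (fun y hy => hne y (by simp [hy]))
            (by rw [hins]; simp [hc])]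
        have : ((x :: t).countP (fun y => decide (s < y.2)) : Int)
             = (t.countP (fun y => decide (s < y.2)) : Int) := by
          rw [List.countP_cons]; simp [hc]
        rw [this]

lemma pv_foldB_u (pkg : String) (s : Int) :
    ∀ (u : List (String × Int)) (r : Int), (∀ p ∈ u, p.1 ≠ pkg) →
    u.foldl (pvStepB PySem.Set.empty pkg s) (r, true)
      = (r + (u.countP (fun y => decide (s ≤ y.2)) : Int), true) := by
  intro u
  induction u with
  | nil => intro r _; simp
  | cons x t ih =>
      intro r hne
      have hx : ¬ x.1 = pkg := hne x (by simp)
      by_cases hc : s ≤ x.2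
      · rw [List.foldl_cons, show pvStepB PySem.Set.empty pkg s (r, true) x = (r + 1, true) by
              rcases lt_or_eq_of_le hc with h | h
              · simp [pvStepB, hx, h]
              · rw [pvStepB]
                simp [hx, h.symm]]
        rw [ih (r + 1) (fun p hp => hne p (by simp [hp]))]
        rw [List.countP_cons]
        have hd : (decide (s ≤ x.2)) = true := by simpa using hc
        simp only [hd, if_true, Nat.cast_add, Nat.cast_one, Prod.mk.injEq]
        exact ⟨by ring, trivial⟩
      · have h1 : ¬ s < x.2 := by omega
        have h2 : ¬ x.2 = s := by omega
        rw [List.foldl_cons, show pvStepB PySem.Set.empty pkg s (r, true) x = (r, true) by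
              simp [pvStepB, hx, h1, h2]]
        rw [ih r (fun p hp => hne p (by simp [hp]))]
        rw [List.countP_cons]
        have hd : (decide (s ≤ x.2)) = false := by simpa using hc
        simp [hd]

lemma pv_foldB_v (pkg : String) (s : Int) :
    ∀ (v : List (String × Int)) (r : Int), (∀ p ∈ v, p.1 ≠ pkg) →
    v.foldl (pvStepB PySem.Set.empty pkg s) (r, false)
      = (r + (v.countP (fun y => decide (s < y.2)) : Int), false) := by
  intro v
  induction v with
  | nil => intro r _; simp
  | cons x t ih =>
      intro r hne
      have hx : ¬ x.1 = pkg := hne x (by simp)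
      by_cases hc : s < x.2
      · rw [List.foldl_cons, show pvStepB PySem.Set.empty pkg s (r, false) x = (r + 1, false) by
              simp [pvStepB, hx, hc]]
        rw [ih (r + 1) (fun p hp => hne p (by simp [hp]))]
        rw [List.countP_cons]
        have hd : (decide (s < x.2)) = true := by simpa using hc
        simp only [hd, if_true, Nat.cast_add, Nat.cast_one, Prod.mk.injEq]
        exact ⟨by ring, trivial⟩
      · rw [List.foldl_cons, show pvStepB PySem.Set.empty pkg s (r, false) x = (r, false) by
              simp [pvStepB, hx, hc]]
        rw [ih r (fun p hp => hne p (by simp [hp]))]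
        rw [List.countP_cons]
        have hd : (decide (s < x.2)) = false := by simpa using hc
        simp [hd]

lemma pv_contains_erase_self (d : PySem.Dict String Int) (k : String) :
    (d.erase k).contains k = false := by
  simp [PySem.Dict.erase, PySem.Dict.contains]

lemma pv_exclFold : ∀ (l : List String), l ≠ [] → ∀ (d : PySem.Dict String Int) (p0 : String),
    ((l.foldl pvStepE (d, p0)).1.contains (l.foldl pvStepE (d, p0)).2) = false := by
  intro l
  induction l with
  | nil => intro h; exact absurd rfl h
  | cons x t ih =>
      intro _ d p0
      rcases eq_or_ne t [] with ht | ht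
      · subst ht
        simp only [List.foldl_cons, List.foldl_nil, pvStepE]
        by_cases hc : d.contains x
        · simp [hc, pv_contains_erase_self]
        · simp only [if_neg hc]
          simpa using hc
      · simp only [List.foldl_cons]
        exact ih ht _ _

lemma pv_decomp (xs : List (String × Int)) (pkg : String) (s : Int)
    (hnd : (xs.map Prod.fst).Nodup) (hm : (pkg, s) ∈ xs) :
    ∃ u v, xs = u ++ (pkg, s) :: v ∧ pkg ∉ u.map Prod.fst ∧ pkg ∉ v.map Prod.fst := by
  obtain ⟨u, v, huv⟩ := List.append_of_mem hm
  refine ⟨u, v, huv, ?_, ?_⟩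
  · subst huv
    rw [List.map_append, List.map_cons] at hnd
    have hd := (List.nodup_append.mp hnd).2.2
    intro hmem
    exact hd pkg hmem pkg (by simp) rfl
  · subst huv
    rw [List.map_append, List.map_cons] at hnd
    exact (List.nodup_cons.mp ((List.nodup_append.mp hnd).2.1)).1

lemma pv_A_excluded (xs : List (String × Int)) (pkg : String) (l : List String) (hl : l ≠ []) :
    find_single_rank xs pkg (some l) = none := by
  simp only [find_single_rank, if_pos hl]
  set st := l.foldl pvStepE (PySem.Dict.mk xs, pkg) with hst
  have hcf : st.1.contains st.2 = false := pv_exclFold l hl _ _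
  apply pv_scan_none
  intro hmem
  have : st.2 ∈ st.1.items.map Prod.fst := by
    rw [pvSortData] at hmem
    exact (pv_mem_map_fst_sorted st.2 st.1.items true).mp hmem
  have hk : st.2 ∈ st.1.keys := by
    simpa [PySem.Dict.keys] using this
  rw [(PySem.Dict.contains_iff_mem_keys st.1 st.2).mpr hk] at hcf
  simp at hcf

lemma pv_main (xs : List (String × Int)) (pkg : String)
    (hnd : (xs.map Prod.fst).Nodup) :
    pvScanA (pvSortData (PySem.Dict.mk xs)) pkg 0 = find_single_rank_alt xs pkg none := by
  have hitems : (PySem.Dict.mk xs).items = xs := rfl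
  cases hget : (PySem.Dict.mk xs).get? pkg with
  | none =>
      have hnk : pkg ∉ xs.map Prod.fst := by
        have := (PySem.Dict.get?_eq_none_iff_not_mem_keys (PySem.Dict.mk xs) pkg).mp hget
        simpa [PySem.Dict.keys, hitems] using this
      rw [show find_single_rank_alt xs pkg none = none by
            simp [find_single_rank_alt, hget]]
      apply pv_scan_none
      rw [pvSortData, hitems]
      exact fun h => hnk ((pv_mem_map_fst_sorted pkg xs true).mp h)
  | some s =>
      have hmem : (pkg, s) ∈ xs := by
        have := PySem.Dict.mem_items_of_get?_eq_some (PySem.Dict.mk xs) hget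
        rwa [hitems] at this
      obtain ⟨u, v, huv, hu, hv⟩ := pv_decomp xs pkg s hnd hmem
      have hns : pkg ∉ (PySem.List.sorted u (fun p => p.2) true).map Prod.fst :=
        fun h => hu ((pv_mem_map_fst_sorted pkg u true).mp h)
      have hins := pv_insert_pkg pkg s (PySem.List.sorted u (fun p => p.2) true)
        (PySem.List.sorted_pairwise_rev u _) hns 0
      rw [(PySem.List.sorted_perm u (fun p => p.2) true).countP_eq (fun y => decide (s ≤ y.2))] at hins
      have hbase : pvScanA (PySem.List.sorted (u ++ [(pkg, s)]) (fun p => p.2) true) pkg 0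
          = some (0 + (u.countP (fun y => decide (s ≤ y.2)) : Int) + 1, s) := by
        rw [pv_sorted_append u [(pkg, s)]]
        simpa using hins
      have hAv : pvScanA (pvSortData (PySem.Dict.mk xs)) pkg 0
          = some (0 + (u.countP (fun y => decide (s ≤ y.2)) : Int) + 1
                    + (v.countP (fun y => decide (s < y.2)) : Int), s) := by
        rw [pvSortData, hitems, huv, show u ++ (pkg, s) :: v = (u ++ [(pkg, s)]) ++ v by simp]
        rw [pv_sorted_append (u ++ [(pkg, s)]) v]
        exact pv_fold_v pkg s v (u ++ [(pkg, s)]) _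
          (fun x hx he => hv (he ▸ List.mem_map_of_mem hx)) hbase
      have hB : find_single_rank_alt xs pkg none
          = some (1 + (u.countP (fun y => decide (s ≤ y.2)) : Int)
                    + (v.countP (fun y => decide (s < y.2)) : Int), s) := by
        simp only [find_single_rank_alt, hget]
        rw [huv, List.foldl_append,
            pv_foldB_u pkg s u 1 (fun p hp he => hu (he ▸ List.mem_map_of_mem hp)),
            List.foldl_cons,
            show pvStepB PySem.Set.empty pkg s (1 + (u.countP (fun y => decide (s ≤ y.2)) : Int), true) (pkg, s)
               = (1 + (u.countP (fun y => decide (s ≤ y.2)) : Int), false) by simp [pvStepB],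
            pv_foldB_v pkg s v _ (fun p hp he => hv (he ▸ List.mem_map_of_mem hp))]
        rfl
      rw [hAv, hB]
      simp only [Option.some.injEq, Prod.mk.injEq]
      exact ⟨by ring, trivial⟩

lemma pv_alt_excluded_none (xs : List (String × Int)) (pkg : String) (l : List String)
    (hl : l ≠ []) (h : pkg ∈ l ∨ pkg ∉ xs.map Prod.fst) :
    find_single_rank_alt xs pkg (some l) = none := by
  by_cases hin : pkg ∈ l
  · simp [find_single_rank_alt, hl, hin]
  · have hnk : pkg ∉ xs.map Prod.fst := h.resolve_left hin
    have hget : (PySem.Dict.mk xs).get? pkg = none := by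
      rw [PySem.Dict.get?_eq_none_iff_not_mem_keys]
      simpa [PySem.Dict.keys] using hnk
    simp [find_single_rank_alt, hl, hin, hget]

lemma pv_alt_some (xs : List (String × Int)) (pkg : String) (l : List String)
    (hl : l ≠ []) (hin : pkg ∉ l) (hk : pkg ∈ xs.map Prod.fst) :
    ∃ r, find_single_rank_alt xs pkg (some l) = some r := by
  cases hget : (PySem.Dict.mk xs).get? pkg with
  | none =>
      exfalso
      have := (PySem.Dict.get?_eq_none_iff_not_mem_keys (PySem.Dict.mk xs) pkg).mp hget
      exact this (by simpa [PySem.Dict.keys] using hk)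
  | some s =>
      refine ⟨((xs.foldl (pvStepB (PySem.Set.ofList l) pkg s) (1, true)).1, s), ?_⟩
      simp [find_single_rank_alt, hl, hin, hget]

-- ===== VERDICT (by name: the statement is the Claim_ definition above) =====
theorem find_single_rank_spec : Claim_unchanged_find_single_rank := by
  intro xs pkg exclude _ hpre
  unfold Spec_find_single_rank
  intro hD
  match exclude with
  | none =>
      show pvScanA (pvSortData (PySem.Dict.mk xs)) pkg 0 = _
      exact pv_main xs pkg hpre
  | some l =>
      by_cases hl : l = []
      · subst hl
        show pvScanA (pvSortData (PySem.Dict.mk xs)) pkg 0 = _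
        rw [pv_main xs pkg hpre]
        rfl
      · rw [pv_A_excluded xs pkg l hl]
        unfold D_find_single_rank at hD
        simp only [Option.getD_some] at hD
        rcases Decidable.em (pkg ∈ l) with hin | hin
        · exact (pv_alt_excluded_none xs pkg l hl (Or.inl hin)).symm
        · rcases Decidable.em (pkg ∈ xs.map Prod.fst) with hk | hk
          · exact absurd ⟨hl, hk, hin⟩ hD
          · exact (pv_alt_excluded_none xs pkg l hl (Or.inr hk)).symm

theorem find_single_rank_changed : Claim_changed_find_single_rank := by
  unfold Claim_changed_find_single_rank; decide

theorem find_single_rank_tight : Claim_exact_find_single_rank := by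
  intro xs pkg exclude _ _ hD
  unfold D_find_single_rank at hD
  obtain ⟨hne, hk, hnin⟩ := hD
  match exclude with
  | none => exact absurd rfl hne
  | some l =>
      have hl : l ≠ [] := by simpa using hne
      rw [pv_A_excluded xs pkg l hl]
      obtain ⟨r, hr⟩ := pv_alt_some xs pkg l hl (by simpa using hnin) hk
      rw [hr]
      simp
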